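-- pv_equiv track=rewrite | github.com/junstory/algorithm | 프로그래머스/1/86491. 최소직사각형/최소직사각형.py | solution
-- ===== SOURCE A (Python) =====
-- def solution(sizes):
--     answer = 0
--     l = []
--     s = []
--     for a,b in sizes:
--         if a > b:
--             l.append(a)
--             s.append(b)
--         else:
--             l.append(b)
--             s.append(a)
--
--     answer = max(l) * max(s)
--
--     return answer
-- ===== SOURCE B (Python) =====
-- def solution(sizes):
--     # Divide and conquer: rec(pairs) returns (max long side, max short side) over pairs.
--     def rec(pairs):
--         if len(pairs) == 1:
--             w, h = pairs[0]
--             return (w, h) if w >= h else (h, w)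
--         mid = len(pairs) // 2
--         l1, s1 = rec(pairs[:mid])
--         l2, s2 = rec(pairs[mid:])
--         return (max(l1, l2), max(s1, s2))
--     l, s = rec(sizes)
--     return l * s
-- ===== Notes on version B (the rewrite author's own statement) =====
-- stated objective: alternative
-- what changed: Replaced the accumulate-two-lists-then-max loop by a divide-and-conquer recursion that splits the list in halves and merges (max-long, max-short) pairs with max, multiplying only at the top; no intermediate lists are built.
import Mathlib
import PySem

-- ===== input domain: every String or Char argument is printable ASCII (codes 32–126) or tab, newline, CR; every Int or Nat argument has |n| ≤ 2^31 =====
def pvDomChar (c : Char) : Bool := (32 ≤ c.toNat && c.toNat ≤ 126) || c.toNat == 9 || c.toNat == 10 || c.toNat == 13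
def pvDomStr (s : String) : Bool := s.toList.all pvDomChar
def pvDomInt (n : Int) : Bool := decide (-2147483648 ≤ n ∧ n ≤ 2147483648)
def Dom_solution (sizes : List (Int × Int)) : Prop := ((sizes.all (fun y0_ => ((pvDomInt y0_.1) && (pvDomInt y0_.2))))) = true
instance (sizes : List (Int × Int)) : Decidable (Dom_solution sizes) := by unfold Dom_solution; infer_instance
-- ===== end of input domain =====

-- B replaces A's accumulate-two-lists-then-max loop by a divide-and-conquer recursion
-- merging (max-long, max-short) pairs; same O(n) cost, different structure (objective: alternative).

-- ===== PORT A =====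
-- loop appending the larger side to l and the smaller to s, then max(l)*max(s)
def solution (sizes : List (Int × Int)) : Int :=
  let ls := sizes.foldl
    (fun (acc : List Int × List Int) p =>
      if p.1 > p.2 then (acc.1 ++ [p.1], acc.2 ++ [p.2])
      else (acc.1 ++ [p.2], acc.2 ++ [p.1]))
    ([], [])
  ((PySem.List.max? ls.1 (fun x => x)).getD 0) * ((PySem.List.max? ls.2 (fun x => x)).getD 0)
  -- .getD 0 is unreachable: Pre_solution excludes the empty list, where Python's max raises

-- ===== PORT B =====
-- rec(pairs): (max long side, max short side) by splitting at len//2 and merging with max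
def solutionRec (pairs : List (Int × Int)) : Int × Int :=
  if pairs.length = 1 then
    match pairs with
    | (w, h) :: _ => if w ≥ h then (w, h) else (h, w)
    | [] => (0, 0)            -- unreachable in this branch
  else if pairs.length = 0 then (0, 0)
    -- totality guard only: Python's rec never terminates on []; [] is outside Pre_solution
  else
    let mid := pairs.length / 2
    let p1 := solutionRec (PySem.List.slice pairs none (some (mid : Int)))
    let p2 := solutionRec (PySem.List.slice pairs (some (mid : Int)) none)
    (max p1.1 p2.1, max p1.2 p2.2)
termination_by pairs.length
decreasing_by
  · simp only [PySem.List.slice_to_natCast, List.length_take]; omega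
  · simp only [PySem.List.slice_from_natCast, List.length_drop]; omega

def solution_alt (sizes : List (Int × Int)) : Int :=
  let ls := solutionRec sizes
  ls.1 * ls.2

-- ===== PRECONDITION & SPEC =====
-- Pre_ excludes only the empty list, where A raises ValueError (max of empty sequence)
-- and B's recursion does not return either.
def Pre_solution (sizes : List (Int × Int)) : Prop := sizes ≠ []
instance (sizes : List (Int × Int)) : Decidable (Pre_solution sizes) := by unfold Pre_solution; infer_instance
def pvWitness_solution : (List (Int × Int)) := [(3, 5)]

def Spec_solution (sizes : List (Int × Int)) (out : Int) : Prop := out = solution_alt sizes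
instance (sizes : List (Int × Int)) (out : Int) : Decidable (Spec_solution sizes out) := by unfold Spec_solution; infer_instance

-- ===== CLAIM (what is proved, stated in full; the proofs are below) =====
def Claim_equal_solution : Prop := ∀ (sizes : List (Int × Int)), Dom_solution sizes → Pre_solution sizes → Spec_solution sizes (solution sizes)

-- ===== LEMMAS AND PROOFS =====

-- max of a nonempty list, as Python's max(l) computes it (head as seed)
def fold1max : List Int → Int
  | [] => 0
  | x :: t => t.foldl max x

theorem foldl_max_pull (t : List Int) : ∀ a b : Int, t.foldl max (max a b) = max a (t.foldl max b) := by
  induction t with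
  | nil => simp
  | cons z t ih =>
    intro a b
    simp only [List.foldl]
    rw [max_assoc, ih]

theorem fold1max_append (l1 l2 : List Int) (h1 : l1 ≠ []) (h2 : l2 ≠ []) :
    fold1max (l1 ++ l2) = max (fold1max l1) (fold1max l2) := by
  cases l1 with
  | nil => exact absurd rfl h1
  | cons x t =>
    cases l2 with
    | nil => exact absurd rfl h2
    | cons y t2 =>
      simp only [fold1max, List.cons_append, List.foldl_append]
      rw [show List.foldl max (List.foldl max x t) (y :: t2)
            = List.foldl max (max (List.foldl max x t) y) t2 from rfl]
      exact foldl_max_pull t2 (t.foldl max x) y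

-- A's fold builds exactly the per-pair max list and per-pair min list.
theorem solution_fold_eq (sizes : List (Int × Int)) (l0 s0 : List Int) :
    sizes.foldl
      (fun (acc : List Int × List Int) p =>
        if p.1 > p.2 then (acc.1 ++ [p.1], acc.2 ++ [p.2])
        else (acc.1 ++ [p.2], acc.2 ++ [p.1]))
      (l0, s0)
    = (l0 ++ sizes.map (fun p => max p.1 p.2), s0 ++ sizes.map (fun p => min p.1 p.2)) := by
  induction sizes generalizing l0 s0 with
  | nil => simp
  | cons p t ih =>
    simp only [List.foldl_cons, List.map_cons]
    by_cases h : p.1 > p.2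
    · simp only [if_pos h, ih]
      simp [max_eq_left (le_of_lt h), min_eq_right (le_of_lt h)]
    · simp only [if_neg h, ih]
      simp [max_eq_right (le_of_not_gt h), min_eq_left (le_of_not_gt h)]

-- B's recursion computes the fold1max of the per-pair max and min lists.
theorem solutionRec_eq (pairs : List (Int × Int)) :
    pairs ≠ [] →
    solutionRec pairs
    = (fold1max (pairs.map (fun p => max p.1 p.2)),
       fold1max (pairs.map (fun p => min p.1 p.2))) := by
  induction pairs using solutionRec.induct with
  | case1 w h tail hwh hlen =>
    intro _
    have ht : tail = [] := by cases tail <;> simp_all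
    subst ht
    rw [solutionRec]
    simp [fold1max, hwh]
  | case2 w h tail hwh hlen =>
    intro _
    have ht : tail = [] := by cases tail <;> simp_all
    subst ht
    rw [solutionRec]
    simp [fold1max, max_eq_right (le_of_not_ge hwh), min_eq_left (le_of_not_ge hwh), hwh]
  | case3 hlen => intro _; simp at hlen
  | case4 x h1 h0 =>
    intro hne
    cases x with
    | nil => exact absurd rfl hne
    | cons _ _ => simp at h0
  | case5 x h1 h0 mid ih1 ih2 =>
    intro _
    rw [solutionRec.eq_def]
    simp only [if_neg h1, if_neg h0]
    have hlen : 2 ≤ x.length := by omega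
    have hmid1 : 1 ≤ x.length / 2 := by omega
    have hmid2 : x.length / 2 < x.length := by omega
    simp only [PySem.List.slice_to_natCast, PySem.List.slice_from_natCast] at ih1 ih2 ⊢
    have htk : x.take (x.length / 2) ≠ [] := by
      apply List.ne_nil_of_length_pos
      rw [List.length_take]
      omega
    have hdr : x.drop (x.length / 2) ≠ [] := by
      apply List.ne_nil_of_length_pos
      rw [List.length_drop]
      omega
    rw [ih1 htk, ih2 hdr]
    have hmaps : ∀ f : (Int × Int) → Int,
        fold1max (x.map f)
        = max (fold1max ((x.take (x.length / 2)).map f))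
              (fold1max ((x.drop (x.length / 2)).map f)) := by
      intro f
      conv_lhs => rw [← List.take_append_drop (x.length / 2) x]
      rw [List.map_append, fold1max_append]
      · simpa using htk
      · simpa using hdr
    simp only [Prod.mk.injEq]
    exact ⟨(hmaps _).symm, (hmaps _).symm⟩

-- ===== VERDICT (by name: the statement is the Claim_ definition above) =====
theorem solution_spec : Claim_equal_solution := by
  intro sizes _ hpre
  unfold Spec_solution solution solution_alt
  rw [solutionRec_eq sizes hpre]
  simp only [solution_fold_eq, List.nil_append]
  cases sizes with
  | nil => exact absurd rfl hpre
  | cons p t =>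
    simp only [List.map_cons]
    rw [PySem.List.max?_id_cons, PySem.List.max?_id_cons]
    simp [fold1max]
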